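-- pv_equiv track=rewrite | github.com/dylansloane/String-Validation | test_string_validation.py | rule5
-- ===== SOURCE A (Python) =====
-- def rule5(string):
--     currentNumber = ""
--     for character in string:
--         if character.isdigit():
--             currentNumber += character
--         else:
--             if currentNumber != "":
--                 if int(currentNumber) < 13:
--                     return False
--                 else:
--                     return True
--     if currentNumber == "":
--         return True
-- ===== SOURCE B (Python) =====
-- def rule5(string):
--     # find the first maximal digit run by index scans, then convert it once
--     n = len(string)
--     i = 0
--     while i < n and not string[i].isdigit():
--         i += 1
--     if i == n:
--         return True
--     j = i
--     while j < n and string[j].isdigit():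
--         j += 1
--     return int(string[i:j]) >= 13
-- ===== Notes on version B (the rewrite author's own statement) =====
-- stated objective: simpler
-- what changed: B replaces A's char-by-char accumulation with early returns by two index scans locating the first maximal digit run, converted once; Pre_ excludes strings whose first digit run extends to the end of the string, where A falls off the loop and returns None instead of a bool while B returns the comparison result.
-- outside the precondition, e.g. on rule5('5'): A returns None, B returns False; on rule5('ab42'): A returns None, B returns True
import Mathlib
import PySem

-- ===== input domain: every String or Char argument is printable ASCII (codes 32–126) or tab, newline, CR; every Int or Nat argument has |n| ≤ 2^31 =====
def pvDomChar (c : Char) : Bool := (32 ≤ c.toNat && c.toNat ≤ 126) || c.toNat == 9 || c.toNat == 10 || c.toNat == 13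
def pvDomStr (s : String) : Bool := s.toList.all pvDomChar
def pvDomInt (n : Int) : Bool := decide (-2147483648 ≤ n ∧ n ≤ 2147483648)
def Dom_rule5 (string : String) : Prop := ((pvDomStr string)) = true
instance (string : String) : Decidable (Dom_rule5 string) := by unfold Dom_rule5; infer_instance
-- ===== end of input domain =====

-- B locates the first maximal digit run by two index scans instead of A's char accumulation; objective: simpler.

-- ===== PORT A =====
-- Char.isDigit matches Python str.isdigit exactly on the ASCII domain Dom_rule5.
-- A's loop with early returns, state = accumulated digit chars `cur`.
def rule5Loop (cs : List Char) (cur : List Char) : Option Bool :=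
  match cs with
  | [] => if cur.isEmpty then some true else none
  | c :: rest =>
    if c.isDigit then rule5Loop rest (cur ++ [c])
    else if cur.isEmpty then rule5Loop rest cur
    else match PySem.Int.ofStr? (String.ofList cur) with   -- int(currentNumber); cur is nonempty digits, never none
      | some v => if v < 13 then some false else some true
      | none => none

def rule5 (string : String) : Option Bool := rule5Loop string.toList []

-- ===== PORT B =====
-- first while loop of Source B: advance until a digit (remaining tail is the state)
def rule5Skip (cs : List Char) : List Char :=
  match cs with
  | [] => []
  | c :: rest => if c.isDigit then c :: rest else rule5Skip rest

-- second while loop of Source B: split the leading digit run from the rest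
def rule5Span (cs : List Char) : List Char × List Char :=
  match cs with
  | [] => ([], [])
  | c :: rest =>
    if c.isDigit then
      let p := rule5Span rest
      (c :: p.1, p.2)
    else ([], c :: rest)

def rule5_alt (string : String) : Option Bool :=
  let cs := rule5Skip string.toList
  if cs.isEmpty then some true
  else
    match PySem.Int.ofStr? (String.ofList (rule5Span cs).1) with   -- int(string[i:j]); nonempty digit run, never none
    | some v => some (decide (13 ≤ v))
    | none => none

-- ===== PRECONDITION & SPEC =====
-- Pre_ excludes strings whose first digit run extends to the end of the string: there A falls
-- off the loop and returns None, not a bool, so no bool-valued B can match it.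
def Pre_rule5 (string : String) : Prop :=
  ¬ (string.toList.dropWhile (fun c => !c.isDigit) ≠ [] ∧
     (string.toList.dropWhile (fun c => !c.isDigit)).all Char.isDigit)
instance (string : String) : Decidable (Pre_rule5 string) := by unfold Pre_rule5; infer_instance
def pvWitness_rule5 : String := "a12b"

def Spec_rule5 (string : String) (out : Option Bool) : Prop := out = rule5_alt string
instance (string : String) (out : Option Bool) : Decidable (Spec_rule5 string out) := by unfold Spec_rule5; infer_instance

-- ===== CLAIM (what is proved, stated in full; the proofs are below) =====
def Claim_equal_rule5 : Prop := ∀ (string : String), Dom_rule5 string → Pre_rule5 string → Spec_rule5 string (rule5 string)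

-- ===== LEMMAS AND PROOFS =====

-- value computed from the digit-run characters, B's form
def rule5Val (cur : List Char) : Option Bool :=
  match PySem.Int.ofStr? (String.ofList cur) with
  | some v => some (decide (13 ≤ v))
  | none => none

lemma rule5_valA_eq_valB (cur : List Char) :
    (match PySem.Int.ofChars? cur with
      | some v => if v < 13 then some false else some true
      | none => (none : Option Bool)) = rule5Val cur := by
  unfold rule5Val
  have h : PySem.Int.ofStr? (String.ofList cur) = PySem.Int.ofChars? cur := by
    simp [PySem.Int.ofStr?]
  rw [h]
  cases hv : PySem.Int.ofChars? cur with
  | none => rfl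
  | some v =>
    rcases lt_or_ge v 13 with h13 | h13
    · simp [if_pos h13, Int.not_le.mpr h13]
    · simp [if_neg (Int.not_lt.mpr h13), h13]

lemma rule5Loop_accum (cs : List Char) (cur : List Char) (hcur : cur ≠ []) :
    rule5Loop cs cur =
      (if (rule5Span cs).2.isEmpty then none else rule5Val (cur ++ (rule5Span cs).1)) := by
  induction cs generalizing cur with
  | nil => simp [rule5Loop, rule5Span, hcur]
  | cons c rest ih =>
    by_cases hd : c.isDigit
    · rw [rule5Loop, rule5Span]
      simp only [hd, if_pos]
      rw [ih (cur ++ [c]) (by simp)]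
      simp [List.append_assoc]
    · rw [rule5Loop, rule5Span]
      simp only [hd, Bool.false_eq_true, if_false, List.isEmpty_cons]
      simp [hcur, rule5_valA_eq_valB]

lemma rule5Loop_eq_alt (cs : List Char) :
    rule5Loop cs [] =
      (if (rule5Skip cs).isEmpty then some true
       else if (rule5Span (rule5Skip cs)).2.isEmpty then none
       else rule5Val (rule5Span (rule5Skip cs)).1) := by
  induction cs with
  | nil => simp [rule5Loop, rule5Skip]
  | cons c rest ih =>
    by_cases hd : c.isDigit
    · rw [rule5Loop, rule5Skip]
      simp only [hd, if_pos, List.nil_append, List.isEmpty_cons, Bool.false_eq_true,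
        if_false]
      rw [rule5Loop_accum rest [c] (by simp)]
      rw [rule5Span]
      simp only [hd, if_pos]
      rfl
    · rw [rule5Loop, rule5Skip]
      simp only [hd, Bool.false_eq_true, if_false]
      exact ih

lemma rule5Skip_eq_dropWhile (cs : List Char) :
    rule5Skip cs = cs.dropWhile (fun c => !c.isDigit) := by
  induction cs with
  | nil => rfl
  | cons c rest ih =>
    by_cases hd : c.isDigit
    · simp [rule5Skip, List.dropWhile, hd]
    · simp [rule5Skip, List.dropWhile, hd, ih]

lemma rule5Span_snd_empty_iff (cs : List Char) :
    (rule5Span cs).2 = [] ↔ cs.all Char.isDigit := by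
  induction cs with
  | nil => simp [rule5Span]
  | cons c rest ih =>
    by_cases hd : c.isDigit
    · simp [rule5Span, hd, ih]
    · simp [rule5Span, hd]

-- ===== VERDICT (by name: the statement is the Claim_ definition above) =====
theorem rule5_spec : Claim_equal_rule5 := by
  intro s _ hpre
  unfold Spec_rule5 rule5 rule5_alt
  rw [rule5Loop_eq_alt]
  by_cases h1 : (rule5Skip s.toList).isEmpty
  · simp [h1]
  · have hne : rule5Skip s.toList ≠ [] := by
      simpa [List.isEmpty_iff] using h1
    have hall : ¬ (rule5Skip s.toList).all Char.isDigit := by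
      intro hall
      exact hpre ⟨by rwa [← rule5Skip_eq_dropWhile],
        by rwa [← rule5Skip_eq_dropWhile]⟩
    have h2 : ¬ (rule5Span (rule5Skip s.toList)).2.isEmpty := by
      intro h
      exact hall ((rule5Span_snd_empty_iff _).1 (List.isEmpty_iff.1 h))
    simp only [h1, Bool.false_eq_true, if_false, h2]
    simp [rule5Val]
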